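-- pv_equiv track=rewrite | github.com/ramanflorfresca/antar-fastapi | antar_engine/jaimini_analysis.py | get_rashi_aspects
-- ===== SOURCE A (Python) =====
-- SIGNS = [
--     "Aries","Taurus","Gemini","Cancer","Leo","Virgo",
--     "Libra","Scorpio","Sagittarius","Capricorn","Aquarius","Pisces"
-- ]
--
-- MOVABLE = ["Aries","Cancer","Libra","Capricorn"]
--
-- FIXED   = ["Taurus","Leo","Scorpio","Aquarius"]
--
-- DUAL    = ["Gemini","Virgo","Sagittarius","Pisces"]
--
-- def get_rashi_aspects(sign: str) -> list:
--     """
--     Jaimini Rashi aspects: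
--     - Movable signs aspect all Fixed signs except adjacent
--     - Fixed signs aspect all Movable signs except adjacent
--     - Dual signs aspect all other Dual signs
--     """
--     if sign not in SIGNS:
--         return []
--
--     sign_idx = SIGNS.index(sign)
--     aspects  = []
--
--     if sign in MOVABLE:
--         # Aspects all Fixed except adjacent
--         adjacent_idx = (sign_idx + 1) % 12
--         adjacent = SIGNS[adjacent_idx]
--         for s in FIXED:
--             if s != adjacent:
--                 aspects.append(s)
--
--     elif sign in FIXED:
--         # Aspects all Movable except adjacent (behind it)
--         adjacent_idx = (sign_idx - 1) % 12
--         adjacent = SIGNS[adjacent_idx]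
--         for s in MOVABLE:
--             if s != adjacent:
--                 aspects.append(s)
--
--     elif sign in DUAL:
--         # Aspects all other Dual signs
--         for s in DUAL:
--             if s != sign:
--                 aspects.append(s)
--
--     return aspects
-- ===== SOURCE B (Python) =====
-- # B: single table lookup instead of classify-then-filter loops; returns a fresh list.
-- RASHI_ASPECTS = {
--     "Aries":       ["Leo", "Scorpio", "Aquarius"],
--     "Taurus":      ["Cancer", "Libra", "Capricorn"],
--     "Gemini":      ["Virgo", "Sagittarius", "Pisces"],
--     "Cancer":      ["Taurus", "Scorpio", "Aquarius"],
--     "Leo":         ["Aries", "Libra", "Capricorn"],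
--     "Virgo":       ["Gemini", "Sagittarius", "Pisces"],
--     "Libra":       ["Taurus", "Leo", "Aquarius"],
--     "Scorpio":     ["Aries", "Cancer", "Capricorn"],
--     "Sagittarius": ["Gemini", "Virgo", "Pisces"],
--     "Capricorn":   ["Taurus", "Leo", "Scorpio"],
--     "Aquarius":    ["Aries", "Cancer", "Libra"],
--     "Pisces":      ["Gemini", "Virgo", "Sagittarius"],
-- }
--
-- def get_rashi_aspects(sign: str) -> list:
--     return list(RASHI_ASPECTS.get(sign, []))
-- ===== Notes on version B (the rewrite author's own statement) =====
-- stated objective: simpler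
-- what changed: Replaces the classify-then-filter branching (index, modular adjacency, per-category loops) with a precomputed 12-entry lookup table returning a fresh copy of the aspect list.
import Mathlib
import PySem

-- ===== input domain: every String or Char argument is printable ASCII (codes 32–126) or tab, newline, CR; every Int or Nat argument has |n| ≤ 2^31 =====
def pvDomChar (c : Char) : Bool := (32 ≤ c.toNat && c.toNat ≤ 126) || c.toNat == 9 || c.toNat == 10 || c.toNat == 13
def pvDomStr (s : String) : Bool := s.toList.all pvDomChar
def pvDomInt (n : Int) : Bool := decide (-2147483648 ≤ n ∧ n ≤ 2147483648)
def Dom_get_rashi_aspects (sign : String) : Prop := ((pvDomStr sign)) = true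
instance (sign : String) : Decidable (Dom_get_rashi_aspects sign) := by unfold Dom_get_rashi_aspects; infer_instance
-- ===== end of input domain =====

-- B replaces A's classify-then-filter branching with one precomputed lookup table (objective: simpler).

-- ===== PORT A =====
def SIGNS : List String :=
  ["Aries","Taurus","Gemini","Cancer","Leo","Virgo",
   "Libra","Scorpio","Sagittarius","Capricorn","Aquarius","Pisces"]

def MOVABLE : List String := ["Aries","Cancer","Libra","Capricorn"]

def FIXED : List String := ["Taurus","Leo","Scorpio","Aquarius"]

def DUAL : List String := ["Gemini","Virgo","Sagittarius","Pisces"]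

def get_rashi_aspects (sign : String) : List String :=
  if ¬ (SIGNS.contains sign) then []
  else
    -- sign ∈ SIGNS here, so SIGNS.index(sign) cannot raise; getD 0 is unreachable
    let sign_idx : Int := ((PySem.List.index? SIGNS sign).getD 0 : Nat)
    if MOVABLE.contains sign then
      let adjacent_idx := PySem.Int.mod (sign_idx + 1) 12
      let adjacent := PySem.List.pyGetD SIGNS adjacent_idx ""
      FIXED.foldl (fun acc s => if s ≠ adjacent then acc ++ [s] else acc) []
    else if FIXED.contains sign then
      let adjacent_idx := PySem.Int.mod (sign_idx - 1) 12
      let adjacent := PySem.List.pyGetD SIGNS adjacent_idx ""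
      MOVABLE.foldl (fun acc s => if s ≠ adjacent then acc ++ [s] else acc) []
    else if DUAL.contains sign then
      DUAL.foldl (fun acc s => if s ≠ sign then acc ++ [s] else acc) []
    else []

-- ===== PORT B =====
def RASHI_ASPECTS : PySem.Dict String (List String) :=
  PySem.Dict.ofList
    [("Aries",       ["Leo", "Scorpio", "Aquarius"]),
     ("Taurus",      ["Cancer", "Libra", "Capricorn"]),
     ("Gemini",      ["Virgo", "Sagittarius", "Pisces"]),
     ("Cancer",      ["Taurus", "Scorpio", "Aquarius"]),
     ("Leo",         ["Aries", "Libra", "Capricorn"]),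
     ("Virgo",       ["Gemini", "Sagittarius", "Pisces"]),
     ("Libra",       ["Taurus", "Leo", "Aquarius"]),
     ("Scorpio",     ["Aries", "Cancer", "Capricorn"]),
     ("Sagittarius", ["Gemini", "Virgo", "Pisces"]),
     ("Capricorn",   ["Taurus", "Leo", "Scorpio"]),
     ("Aquarius",    ["Aries", "Cancer", "Libra"]),
     ("Pisces",      ["Gemini", "Virgo", "Sagittarius"])]

def get_rashi_aspects_alt (sign : String) : List String :=
  PySem.Dict.getD RASHI_ASPECTS sign []

-- ===== PRECONDITION & SPEC =====
def Spec_get_rashi_aspects (sign : String) (out : List String) : Prop := out = get_rashi_aspects_alt sign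
instance (sign : String) (out : List String) : Decidable (Spec_get_rashi_aspects sign out) := by unfold Spec_get_rashi_aspects; infer_instance

-- ===== CLAIM (what is proved, stated in full; the proofs are below) =====
def Claim_equal_get_rashi_aspects : Prop := ∀ (sign : String), Dom_get_rashi_aspects sign → Spec_get_rashi_aspects sign (get_rashi_aspects sign)

-- ===== LEMMAS AND PROOFS =====
theorem get_rashi_aspects_agree (sign : String) :
    get_rashi_aspects sign = get_rashi_aspects_alt sign := by
  by_cases h1 : sign = "Aries"; · subst h1; decide
  by_cases h2 : sign = "Taurus"; · subst h2; decide
  by_cases h3 : sign = "Gemini"; · subst h3; decide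
  by_cases h4 : sign = "Cancer"; · subst h4; decide
  by_cases h5 : sign = "Leo"; · subst h5; decide
  by_cases h6 : sign = "Virgo"; · subst h6; decide
  by_cases h7 : sign = "Libra"; · subst h7; decide
  by_cases h8 : sign = "Scorpio"; · subst h8; decide
  by_cases h9 : sign = "Sagittarius"; · subst h9; decide
  by_cases h10 : sign = "Capricorn"; · subst h10; decide
  by_cases h11 : sign = "Aquarius"; · subst h11; decide
  by_cases h12 : sign = "Pisces"; · subst h12; decide
  have h1b : ("Aries" == sign) = false := by simp; exact fun h => h1 h.symm
  have h2b : ("Taurus" == sign) = false := by simp; exact fun h => h2 h.symm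
  have h3b : ("Gemini" == sign) = false := by simp; exact fun h => h3 h.symm
  have h4b : ("Cancer" == sign) = false := by simp; exact fun h => h4 h.symm
  have h5b : ("Leo" == sign) = false := by simp; exact fun h => h5 h.symm
  have h6b : ("Virgo" == sign) = false := by simp; exact fun h => h6 h.symm
  have h7b : ("Libra" == sign) = false := by simp; exact fun h => h7 h.symm
  have h8b : ("Scorpio" == sign) = false := by simp; exact fun h => h8 h.symm
  have h9b : ("Sagittarius" == sign) = false := by simp; exact fun h => h9 h.symm
  have h10b : ("Capricorn" == sign) = false := by simp; exact fun h => h10 h.symm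
  have h11b : ("Aquarius" == sign) = false := by simp; exact fun h => h11 h.symm
  have h12b : ("Pisces" == sign) = false := by simp; exact fun h => h12 h.symm
  simp [get_rashi_aspects, get_rashi_aspects_alt, SIGNS, RASHI_ASPECTS,
    PySem.Dict.getD, PySem.Dict.get?, PySem.Dict.ofList, PySem.Dict.update,
    PySem.Dict.insert, PySem.Dict.contains, PySem.Dict.empty, List.find?,
    h1, h2, h3, h4, h5, h6, h7, h8, h9, h10, h11, h12,
    h1b, h2b, h3b, h4b, h5b, h6b, h7b, h8b, h9b, h10b, h11b, h12b]

-- ===== VERDICT (by name: the statement is the Claim_ definition above) =====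
theorem get_rashi_aspects_spec : Claim_equal_get_rashi_aspects := by
  intro sign _
  exact get_rashi_aspects_agree sign
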